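-- pv_equiv track=rewrite | github.com/myralala/Guji-TAI | methods/logit_lens/logit_lens_main.py | _collect_logit_hint_tokens
-- ===== SOURCE A (Python) =====
-- def _collect_logit_hint_tokens(layer_tokens, max_hints: int = 8):
--     hints = []
--     for tokens in reversed(layer_tokens):
--         for token in tokens[:3]:
--             text = str(token).strip()
--             if text and text not in hints:
--                 hints.append(text)
--             if len(hints) >= max_hints:
--                 return hints
--     return hints
-- ===== SOURCE B (Python) =====
-- def _collect_logit_hint_tokens(layer_tokens, max_hints: int = 8):
--     candidates = [text
--                   for tokens in reversed(layer_tokens)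
--                   for token in tokens[:3]
--                   if (text := str(token).strip())]
--     unique = list(dict.fromkeys(candidates))
--     return unique[:max(max_hints, 0)]
-- ===== Notes on version B (the rewrite author's own statement) =====
-- stated objective: idiomatic
-- what changed: Replaces A's interleaved nested-loop dedup with early return by a three-stage pipeline: materialize all stripped nonempty candidates with a comprehension, ordered-dedup them with dict.fromkeys, then slice off the first max_hints.
-- intended difference: When max_hints <= 0 and the first token A scans (head of the last layer with a nonempty first-3 slice) strips to a nonempty string, A returns that one hint despite max_hints asking for none, because its length check runs only after an append; B returns the intended empty list. — e.g. on _collect_logit_hint_tokens([["a"]], 0): A returns ["a"], B returns []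
import Mathlib
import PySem

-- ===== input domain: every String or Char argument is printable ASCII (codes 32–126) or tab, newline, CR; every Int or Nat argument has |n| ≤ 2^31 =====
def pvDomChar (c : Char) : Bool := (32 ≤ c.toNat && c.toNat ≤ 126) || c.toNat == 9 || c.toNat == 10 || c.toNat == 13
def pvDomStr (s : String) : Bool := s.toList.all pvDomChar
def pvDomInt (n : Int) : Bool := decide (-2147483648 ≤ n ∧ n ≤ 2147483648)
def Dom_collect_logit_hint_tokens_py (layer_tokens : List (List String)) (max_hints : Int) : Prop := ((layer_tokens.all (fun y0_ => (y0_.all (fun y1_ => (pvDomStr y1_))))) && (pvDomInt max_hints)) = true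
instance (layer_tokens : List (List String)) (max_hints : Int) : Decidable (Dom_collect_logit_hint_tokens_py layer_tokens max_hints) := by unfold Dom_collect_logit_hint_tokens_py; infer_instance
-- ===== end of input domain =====

-- B replaces A's interleaved dedup-with-early-return by materialize / ordered-dedup / slice (idiomatic).

-- ===== PORT A =====
-- inner 'for token in tokens[:3]' loop; Bool = early 'return' taken
def pvAInner (max_hints : Int) : List String → List String → List String × Bool
  | hints, [] => (hints, false)
  | hints, token :: rest =>
    let text := PySem.Str.strip token
    let hints' := if text ≠ "" ∧ hints.contains text = false then hints ++ [text] else hints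
    if max_hints ≤ (hints'.length : Int) then (hints', true)
    else pvAInner max_hints hints' rest

-- outer 'for tokens in reversed(layer_tokens)' loop
def pvAOuter (max_hints : Int) : List String → List (List String) → List String
  | hints, [] => hints
  | hints, tokens :: rest =>
    let p := pvAInner max_hints hints (PySem.List.slice tokens none (some 3))
    if p.2 then p.1 else pvAOuter max_hints p.1 rest

def collect_logit_hint_tokens_py (layer_tokens : List (List String)) (max_hints : Int) : List String :=
  pvAOuter max_hints [] layer_tokens.reverse

-- ===== PORT B =====
-- the comprehension's filter: keep str(token).strip() when truthy
def pvStripKeep (token : String) : Option String :=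
  let text := PySem.Str.strip token
  if text = "" then none else some text

def collect_logit_hint_tokens_py_alt (layer_tokens : List (List String)) (max_hints : Int) : List String :=
  let candidates := (layer_tokens.reverse.flatMap (fun tokens => PySem.List.slice tokens none (some 3))).filterMap pvStripKeep
  let unique := PySem.List.dedup candidates   -- list(dict.fromkeys(candidates))
  PySem.List.slice unique none (some (max max_hints 0))   -- unique[:max(max_hints, 0)]

-- ===== PRECONDITION & SPEC =====
-- the first token A scans: head of the last layer whose tokens[:3] is nonempty
def pvFirstScanned (layer_tokens : List (List String)) : String :=
  match layer_tokens.reverse.find? (fun ts => !ts.isEmpty) with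
  | some ts => PySem.Str.strip (ts.headD "")
  | none => ""

-- When max_hints ≤ 0 and the first scanned token strips to a nonempty string, A returns that one
-- hint even though max_hints asked for none; B returns an empty list, the intended "no hints requested" value.
def D_collect_logit_hint_tokens_py (layer_tokens : List (List String)) (max_hints : Int) : Prop :=
  max_hints ≤ 0 ∧ pvFirstScanned layer_tokens ≠ ""
instance (layer_tokens : List (List String)) (max_hints : Int) : Decidable (D_collect_logit_hint_tokens_py layer_tokens max_hints) := by unfold D_collect_logit_hint_tokens_py; infer_instance

def Spec_collect_logit_hint_tokens_py (layer_tokens : List (List String)) (max_hints : Int) (out : List String) : Prop := ¬ D_collect_logit_hint_tokens_py layer_tokens max_hints → out = collect_logit_hint_tokens_py_alt layer_tokens max_hints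
instance (layer_tokens : List (List String)) (max_hints : Int) (out : List String) : Decidable (Spec_collect_logit_hint_tokens_py layer_tokens max_hints out) := by unfold Spec_collect_logit_hint_tokens_py; infer_instance

def pvDiffWitness_collect_logit_hint_tokens_py : List (List String) × Int := ([["a"]], 0)
def pvDiffWitnessOut_collect_logit_hint_tokens_py : (List String) × (List String) := (["a"], [])

-- ===== CLAIM (what is proved, stated in full; the proofs are below) =====
def Claim_unchanged_collect_logit_hint_tokens_py : Prop := ∀ (layer_tokens : List (List String)) (max_hints : Int), Dom_collect_logit_hint_tokens_py layer_tokens max_hints → Spec_collect_logit_hint_tokens_py layer_tokens max_hints (collect_logit_hint_tokens_py layer_tokens max_hints)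
def Claim_changed_collect_logit_hint_tokens_py : Prop := Dom_collect_logit_hint_tokens_py (pvDiffWitness_collect_logit_hint_tokens_py.1) (pvDiffWitness_collect_logit_hint_tokens_py.2) ∧ D_collect_logit_hint_tokens_py (pvDiffWitness_collect_logit_hint_tokens_py.1) (pvDiffWitness_collect_logit_hint_tokens_py.2) ∧ collect_logit_hint_tokens_py (pvDiffWitness_collect_logit_hint_tokens_py.1) (pvDiffWitness_collect_logit_hint_tokens_py.2) = pvDiffWitnessOut_collect_logit_hint_tokens_py.1 ∧ collect_logit_hint_tokens_py_alt (pvDiffWitness_collect_logit_hint_tokens_py.1) (pvDiffWitness_collect_logit_hint_tokens_py.2) = pvDiffWitnessOut_collect_logit_hint_tokens_py.2 ∧ pvDiffWitnessOut_collect_logit_hint_tokens_py.1 ≠ pvDiffWitnessOut_collect_logit_hint_tokens_py.2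
def Claim_exact_collect_logit_hint_tokens_py : Prop := ∀ (layer_tokens : List (List String)) (max_hints : Int), Dom_collect_logit_hint_tokens_py layer_tokens max_hints → D_collect_logit_hint_tokens_py layer_tokens max_hints → collect_logit_hint_tokens_py layer_tokens max_hints ≠ collect_logit_hint_tokens_py_alt layer_tokens max_hints

-- ===== LEMMAS AND PROOFS =====

-- ordered dedup from an accumulator (proof-only mirror of Set.ofList's foldl)
def pvDedupFrom (h : List String) : List String → List String
  | [] => []
  | c :: cs => if h.contains c then pvDedupFrom h cs else c :: pvDedupFrom (h ++ [c]) cs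

lemma pv_foldl_add (xs : List String) : ∀ (acc : List String),
    List.foldl PySem.Set.add acc xs = acc ++ pvDedupFrom acc xs := by
  induction xs with
  | nil => intro acc; simp [pvDedupFrom]
  | cons c cs ih =>
    intro acc
    simp only [List.foldl_cons, PySem.Set.add, pvDedupFrom]
    by_cases h : c ∈ acc
    · simp [h, ih]
    · simp [h, ih]

lemma pv_inner_append (m : Int) (xs : List String) : ∀ (h ys : List String),
    pvAInner m h (xs ++ ys) =
      (if (pvAInner m h xs).2 then pvAInner m h xs else pvAInner m (pvAInner m h xs).1 ys) := by
  induction xs with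
  | nil => intro h ys; simp [pvAInner]
  | cons t ts ih =>
    intro h ys
    simp only [List.cons_append, pvAInner]
    by_cases hcond : PySem.Str.strip t ≠ "" ∧ h.contains (PySem.Str.strip t) = false
    · simp only [if_pos hcond]
      by_cases hc : m ≤ ((h ++ [PySem.Str.strip t]).length : Int)
      · simp only [if_pos hc]; simp
      · simp only [if_neg hc]; exact ih _ ys
    · simp only [if_neg hcond]
      by_cases hc : m ≤ (h.length : Int)
      · simp only [if_pos hc]; simp
      · simp only [if_neg hc]; exact ih _ ys

lemma pv_outer_flat (m : Int) (layers : List (List String)) : ∀ (h : List String),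
    pvAOuter m h layers =
      (pvAInner m h (layers.flatMap (fun ts => PySem.List.slice ts none (some 3)))).1 := by
  induction layers with
  | nil => intro h; simp [pvAOuter, pvAInner]
  | cons ts rest ih =>
    intro h
    simp only [pvAOuter, List.flatMap_cons, pv_inner_append]
    by_cases hp : (pvAInner m h (PySem.List.slice ts none (some 3))).2
    · simp [hp]
    · simp [hp, ih]

lemma pv_inner_char (m : Int) (toks : List String) : ∀ (h : List String),
    (h.length : Int) < m →
    (pvAInner m h toks).1 = (h ++ pvDedupFrom h (toks.filterMap pvStripKeep)).take m.toNat := by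
  induction toks with
  | nil =>
    intro h hlt
    have hle : h.length ≤ m.toNat := by omega
    simp [pvAInner, pvDedupFrom, List.take_of_length_le hle]
  | cons t ts ih =>
    intro h hlt
    have hnot : ¬ (m ≤ (h.length : Int)) := by omega
    by_cases he : PySem.Str.strip t = ""
    · have hcond : ¬ (PySem.Str.strip t ≠ "" ∧ h.contains (PySem.Str.strip t) = false) := by
        simp [he]
      have hstep : List.filterMap pvStripKeep (t :: ts) = List.filterMap pvStripKeep ts := by
        simp [pvStripKeep, he]
      simp only [pvAInner, if_neg hcond, if_neg hnot, hstep]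
      exact ih h hlt
    · by_cases hc : PySem.Str.strip t ∈ h
      · have hcond : ¬ (PySem.Str.strip t ≠ "" ∧ h.contains (PySem.Str.strip t) = false) := by
          simp [he, hc]
        have hstep : List.filterMap pvStripKeep (t :: ts) = PySem.Str.strip t :: List.filterMap pvStripKeep ts := by
          simp [pvStripKeep, he]
        have hded : pvDedupFrom h (PySem.Str.strip t :: List.filterMap pvStripKeep ts)
            = pvDedupFrom h (List.filterMap pvStripKeep ts) := by
          simp [pvDedupFrom, hc]
        simp only [pvAInner, if_neg hcond, if_neg hnot, hstep, hded]
        exact ih h hlt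
      · have hcond : PySem.Str.strip t ≠ "" ∧ h.contains (PySem.Str.strip t) = false := by
          refine ⟨he, ?_⟩; simpa using hc
        have hstep : List.filterMap pvStripKeep (t :: ts) = PySem.Str.strip t :: List.filterMap pvStripKeep ts := by
          simp [pvStripKeep, he]
        have hded : pvDedupFrom h (PySem.Str.strip t :: List.filterMap pvStripKeep ts)
            = PySem.Str.strip t :: pvDedupFrom (h ++ [PySem.Str.strip t]) (List.filterMap pvStripKeep ts) := by
          simp [pvDedupFrom, hc]
        have hassoc : h ++ PySem.Str.strip t :: pvDedupFrom (h ++ [PySem.Str.strip t]) (List.filterMap pvStripKeep ts)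
            = (h ++ [PySem.Str.strip t]) ++ pvDedupFrom (h ++ [PySem.Str.strip t]) (List.filterMap pvStripKeep ts) := by
          simp
        simp only [pvAInner, if_pos hcond, hstep, hded, hassoc]
        by_cases hm : m ≤ ((h ++ [PySem.Str.strip t]).length : Int)
        · simp only [if_pos hm]
          have hlen : m.toNat = (h ++ [PySem.Str.strip t]).length := by simp at hm ⊢; omega
          rw [hlen, List.take_left]
        · simp only [if_neg hm]
          have hlt' : ((h ++ [PySem.Str.strip t]).length : Int) < m := by simp at hm ⊢; omega
          exact ih _ hlt'

-- A for non-positive max_hints: returns at the first scanned token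
lemma pv_outer_nonpos (m : Int) (hm : m ≤ 0) : ∀ (r : List (List String)),
    pvAOuter m [] r =
      (match r.find? (fun ts => !ts.isEmpty) with
       | some ts => if PySem.Str.strip (ts.headD "") = "" then [] else [PySem.Str.strip (ts.headD "")]
       | none => []) := by
  intro r
  induction r with
  | nil => simp [pvAOuter]
  | cons ts rest ih =>
    cases ts with
    | nil =>
      simp only [pvAOuter, PySem.List.slice, List.find?]
      simp [pvAInner, ih]
    | cons t ts' =>
      have hslice : PySem.List.slice (t :: ts') none (some 3) = t :: (ts'.take 2) := by
        rw [PySem.List.slice_to (t :: ts') (by omega : (0:Int) ≤ 3)]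
        simp [List.take_succ_cons]
      simp only [pvAOuter, hslice, pvAInner]
      by_cases he : PySem.Str.strip t = ""
      · simp [he, hm, List.find?]
      · have h1 : m ≤ (1 : Int) := by omega
        simp [h1, List.find?, he]

lemma pv_alt_pos (layer_tokens : List (List String)) (m : Int) (hm : 1 ≤ m) :
    collect_logit_hint_tokens_py_alt layer_tokens m =
      (pvDedupFrom [] ((layer_tokens.reverse.flatMap (fun ts => PySem.List.slice ts none (some 3))).filterMap pvStripKeep)).take m.toNat := by
  simp only [collect_logit_hint_tokens_py_alt, PySem.List.dedup_eq_ofList, PySem.Set.ofList]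
  rw [show max m 0 = m by omega, PySem.List.slice_to _ (by omega : (0:Int) ≤ m)]
  rw [show (PySem.Set.empty : PySem.Set String) = ([] : List String) from rfl]
  rw [pv_foldl_add]
  simp

lemma pv_alt_nonpos (layer_tokens : List (List String)) (m : Int) (hm : m ≤ 0) :
    collect_logit_hint_tokens_py_alt layer_tokens m = [] := by
  simp only [collect_logit_hint_tokens_py_alt]
  rw [show max m 0 = 0 by omega, PySem.List.slice_to _ (by omega : (0:Int) ≤ 0)]
  simp

-- ===== VERDICT (by name: the statement is the Claim_ definition above) =====
theorem collect_logit_hint_tokens_py_spec : Claim_unchanged_collect_logit_hint_tokens_py := by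
  intro layer_tokens m _ hnD
  by_cases hm : 1 ≤ m
  · unfold collect_logit_hint_tokens_py
    rw [pv_outer_flat, pv_inner_char m _ [] (by simp; omega), pv_alt_pos _ _ hm]
    simp
  · have hm0 : m ≤ 0 := by omega
    have hf : pvFirstScanned layer_tokens = "" := by
      by_contra h
      exact hnD ⟨hm0, h⟩
    rw [pv_alt_nonpos _ _ hm0]
    unfold collect_logit_hint_tokens_py
    rw [pv_outer_nonpos m hm0]
    unfold pvFirstScanned at hf
    revert hf
    cases hfind : layer_tokens.reverse.find? (fun ts => !ts.isEmpty) with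
    | none => simp
    | some ts => intro hf; cases ts <;> simp_all

theorem collect_logit_hint_tokens_py_changed : Claim_changed_collect_logit_hint_tokens_py := by
  unfold Claim_changed_collect_logit_hint_tokens_py; decide

theorem collect_logit_hint_tokens_py_tight : Claim_exact_collect_logit_hint_tokens_py := by
  intro layer_tokens m _ hD
  obtain ⟨hm0, hf⟩ := hD
  rw [pv_alt_nonpos _ _ hm0]
  unfold collect_logit_hint_tokens_py
  rw [pv_outer_nonpos m hm0]
  unfold pvFirstScanned at hf
  revert hf
  cases hfind : layer_tokens.reverse.find? (fun ts => !ts.isEmpty) with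
  | none => simp
  | some ts => intro hf; cases ts <;> simp_all
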